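-- pv_equiv track=rewrite | github.com/Ben-Collett/fuzzy_chips | casing.py | _upper_before_non_underscore_special
-- ===== SOURCE A (Python) =====
-- def _upper_before_non_underscore_special(s, on_empty=False):
--     length = 0
--     for ch in s:
--         length += 1
--         if not ch.isalnum() and ch != "_":
--             return False
--         elif ch.isupper():
--             return True
--     out = on_empty
--     if length > 0:
--         out = False
--     return out
-- ===== SOURCE B (Python) =====
-- def _upper_before_non_underscore_special(s, on_empty=False):
--     # Decide by the earliest indices of an uppercase char and of a special
--     # (non-alnum, non-underscore) char, instead of A's single early-return loop.
--     if not s: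
--         return on_empty
--     first_upper = next((i for i, ch in enumerate(s) if ch.isupper()), None)
--     first_special = next((i for i, ch in enumerate(s)
--                           if not (ch.isalnum() or ch == "_")), None)
--     if first_special is None:
--         return first_upper is not None
--     if first_upper is None:
--         return False
--     return first_upper < first_special
-- ===== Notes on version B (the rewrite author's own statement) =====
-- stated objective: alternative
-- what changed: Replaces A's single early-return loop with counter by two index lookups (earliest uppercase index, earliest special-character index) and a final comparison of the two indices.
import Mathlib
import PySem

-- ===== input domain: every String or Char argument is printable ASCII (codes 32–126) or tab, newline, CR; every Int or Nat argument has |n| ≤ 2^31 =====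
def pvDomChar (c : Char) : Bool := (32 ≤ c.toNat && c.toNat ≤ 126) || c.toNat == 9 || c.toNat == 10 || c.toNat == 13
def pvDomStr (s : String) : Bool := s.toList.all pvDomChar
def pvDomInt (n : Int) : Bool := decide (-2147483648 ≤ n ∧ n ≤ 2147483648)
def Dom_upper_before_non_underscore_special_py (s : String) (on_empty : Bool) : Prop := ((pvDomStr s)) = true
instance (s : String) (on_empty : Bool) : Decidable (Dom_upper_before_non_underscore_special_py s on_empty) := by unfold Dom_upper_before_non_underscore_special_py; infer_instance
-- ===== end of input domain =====

-- B decides via the earliest uppercase index and earliest special-char index instead of A's early-return loop; same return value, proved below.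
-- ===== PORT A =====
def pyA_loop (on_empty : Bool) : List Char → Int → Bool
  | [], length => if length > 0 then false else on_empty
  | ch :: rest, length =>
    let length := length + 1
    if ¬ (PySem.Chars.isalnum ch) ∧ ch ≠ '_' then false
    else if PySem.Chars.isupper ch then true
    else pyA_loop on_empty rest length

def upper_before_non_underscore_special_py (s : String) (on_empty : Bool) : Bool :=
  pyA_loop on_empty s.toList 0

-- ===== PORT B =====
def upper_before_non_underscore_special_py_alt (s : String) (on_empty : Bool) : Bool :=
  let cs := s.toList
  if cs.isEmpty then on_empty
  else
    let first_upper := cs.findIdx? (fun ch => PySem.Chars.isupper ch)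
    let first_special := cs.findIdx? (fun ch => !(PySem.Chars.isalnum ch || ch == '_'))
    match first_special with
    | none => first_upper.isSome
    | some j =>
      match first_upper with
      | none => false
      | some i => decide (i < j)

-- ===== PRECONDITION & SPEC =====
def Spec_upper_before_non_underscore_special_py (s : String) (on_empty : Bool) (out : Bool) : Prop := out = upper_before_non_underscore_special_py_alt s on_empty
instance (s : String) (on_empty : Bool) (out : Bool) : Decidable (Spec_upper_before_non_underscore_special_py s on_empty out) := by unfold Spec_upper_before_non_underscore_special_py; infer_instance

-- ===== CLAIM (what is proved, stated in full; the proofs are below) =====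
def Claim_equal_upper_before_non_underscore_special_py : Prop := ∀ (s : String) (on_empty : Bool), Dom_upper_before_non_underscore_special_py s on_empty → Spec_upper_before_non_underscore_special_py s on_empty (upper_before_non_underscore_special_py s on_empty)

-- ===== LEMMAS AND PROOFS =====
-- B's decision on a nonempty character list, as a named function for the invariant.
def altDecide (cs : List Char) : Bool :=
  match cs.findIdx? (fun ch => !(PySem.Chars.isalnum ch || ch == '_')) with
  | none => (cs.findIdx? (fun ch => PySem.Chars.isupper ch)).isSome
  | some j =>
    match cs.findIdx? (fun ch => PySem.Chars.isupper ch) with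
    | none => false
    | some i => decide (i < j)

theorem pyA_loop_eq_altDecide (on_empty : Bool) (cs : List Char) (n : Int) (hn : 0 ≤ n)
    (hne : cs ≠ []) : pyA_loop on_empty cs n = altDecide cs := by
  induction cs generalizing n with
  | nil => exact absurd rfl hne
  | cons ch rest ih =>
    by_cases hs : (!(PySem.Chars.isalnum ch || ch == '_')) = true
    · -- head is special: A returns false; B's first_special is index 0
      have hs' : ¬ (PySem.Chars.isalnum ch) = true ∧ ch ≠ '_' := by
        simp only [Bool.not_eq_eq_eq_not, Bool.not_true, Bool.or_eq_false_iff,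
          beq_eq_false_iff_ne] at hs
        exact ⟨by simp [hs.1], hs.2⟩
      by_cases hu : PySem.Chars.isupper ch = true
      · simp [pyA_loop, altDecide, List.findIdx?_cons, hs, hu, hs']
      · simp only [pyA_loop, altDecide, List.findIdx?_cons, hs, hu, if_pos hs', if_true,
          Bool.false_eq_true, if_false]
        cases List.findIdx? (fun ch => PySem.Chars.isupper ch) rest <;> simp
    · have hs0 : (!(PySem.Chars.isalnum ch || ch == '_')) = false := by
        simpa using hs
      have hs2 : ¬ ((¬ (PySem.Chars.isalnum ch) = true) ∧ ch ≠ '_') := by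
        simp only [Bool.not_eq_eq_eq_not, Bool.not_true, Bool.or_eq_false_iff,
          beq_eq_false_iff_ne] at hs
        intro ⟨h1, h2⟩
        exact hs ⟨by simpa using h1, h2⟩
      by_cases hu : PySem.Chars.isupper ch = true
      · -- head is uppercase (and not special): A returns true; B's first_upper is index 0
        simp only [pyA_loop, altDecide, List.findIdx?_cons, hu, hs0, if_neg hs2, if_true,
          Bool.false_eq_true, if_false]
        cases List.findIdx? (fun ch => !(PySem.Chars.isalnum ch || ch == '_')) rest <;> simp
      · -- head passes both tests: recurse; both first indices shift by one
        simp only [pyA_loop, altDecide, List.findIdx?_cons, hu, hs0, if_neg hs2,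
          Bool.false_eq_true, if_false]
        cases hrest : rest with
        | nil =>
          have h1 : (0 : Int) < n + 1 := by omega
          simp [pyA_loop, h1]
        | cons c' r' =>
          rw [← hrest, ih (n + 1) (by omega) (by simp [hrest])]
          unfold altDecide
          cases List.findIdx? (fun ch => !(PySem.Chars.isalnum ch || ch == '_')) rest with
          | none => cases List.findIdx? (fun ch => PySem.Chars.isupper ch) rest <;> simp
          | some j =>
            cases List.findIdx? (fun ch => PySem.Chars.isupper ch) rest with
            | none => simp
            | some i =>
              simp only [Option.map_some]
              have h2 : (i < j) ↔ (i + 1 < j + 1) := by omega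
              exact decide_eq_decide.mpr h2

-- ===== VERDICT (by name: the statement is the Claim_ definition above) =====
theorem upper_before_non_underscore_special_py_spec : Claim_equal_upper_before_non_underscore_special_py := by
  intro s on_empty _
  unfold Spec_upper_before_non_underscore_special_py upper_before_non_underscore_special_py
    upper_before_non_underscore_special_py_alt
  cases h : s.toList with
  | nil => simp [pyA_loop, h]
  | cons c r =>
    rw [← h]
    rw [pyA_loop_eq_altDecide on_empty s.toList 0 le_rfl (by simp [h])]
    rw [if_neg (by simp [h])]
    rfl
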